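-- pv_equiv track=rewrite | github.com/Cristian0473/NutriSync | Core/motor_recomendacion.py | _agrupar_ingredientes
-- ===== SOURCE A (Python) =====
-- from typing import Dict, List, Tuple, Optional
--
-- def _agrupar_ingredientes(ingredientes: List[Dict]) -> Dict:
--     """Agrupa ingredientes por tipo para facilitar la selección variada"""
--     grupos = {
--         'GRUPO2_VERDURAS': [],
--         'GRUPO5_CARNES': [],
--         'GRUPO1_CEREALES': [],
--         'GRUPO3_FRUTAS': [],
--         'GRUPO4_LACTEOS': [],
--         'GRUPO7_GRASAS': []
--     }
--
--     for ingrediente in ingredientes: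
--         grupo = ingrediente['grupo']
--         if grupo in grupos:
--             grupos[grupo].append(ingrediente)
--
--     return grupos
-- ===== SOURCE B (Python) =====
-- def _agrupar_ingredientes(ingredientes):
--     """Agrupa ingredientes por tipo para facilitar la selección variada"""
--     return {
--         g: [ing for ing in ingredientes if ing['grupo'] == g]
--         for g in ('GRUPO2_VERDURAS', 'GRUPO5_CARNES', 'GRUPO1_CEREALES',
--                   'GRUPO3_FRUTAS', 'GRUPO4_LACTEOS', 'GRUPO7_GRASAS')
--     }
-- ===== Notes on version B (the rewrite author's own statement) =====
-- stated objective: alternative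
-- what changed: Replaces the single dispatch pass (mutable dict of buckets, appending each ingredient to its group) with a dict comprehension over the six fixed group names that filters the ingredient list once per group.
import Mathlib
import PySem

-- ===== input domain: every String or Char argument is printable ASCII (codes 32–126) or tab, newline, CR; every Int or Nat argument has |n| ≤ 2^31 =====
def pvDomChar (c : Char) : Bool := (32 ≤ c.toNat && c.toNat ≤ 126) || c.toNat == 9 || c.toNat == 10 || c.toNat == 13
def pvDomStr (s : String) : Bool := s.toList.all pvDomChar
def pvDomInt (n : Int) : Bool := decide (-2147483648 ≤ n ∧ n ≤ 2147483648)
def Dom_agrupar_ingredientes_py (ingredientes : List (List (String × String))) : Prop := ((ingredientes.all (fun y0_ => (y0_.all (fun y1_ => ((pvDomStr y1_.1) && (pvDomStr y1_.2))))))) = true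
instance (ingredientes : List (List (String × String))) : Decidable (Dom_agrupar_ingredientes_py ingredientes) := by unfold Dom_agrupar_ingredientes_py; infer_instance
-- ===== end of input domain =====

-- B replaces A's single dispatch pass over a mutable dict of buckets with one filter pass per
-- fixed group name (alternative decomposition, same results and key order).

-- ===== PORT A =====
-- ingrediente['grupo'] (raises KeyError if missing; Pre_ excludes that, '' stands for the none case)
def pvKeyA (ing : List (String × String)) : String :=
  ((PySem.Dict.mk ing).get? "grupo").getD ""

def agrupar_ingredientes_py (ingredientes : List (List (String × String))) : List (String × List (List (String × String))) :=
  let grupos : PySem.Dict String (List (List (String × String))) :=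
    PySem.Dict.ofList [("GRUPO2_VERDURAS", []), ("GRUPO5_CARNES", []), ("GRUPO1_CEREALES", []),
                       ("GRUPO3_FRUTAS", []), ("GRUPO4_LACTEOS", []), ("GRUPO7_GRASAS", [])]
  (ingredientes.foldl (fun gs ingrediente =>
      let grupo := pvKeyA ingrediente
      if gs.contains grupo then gs.modify grupo [] (fun l => l ++ [ingrediente]) else gs)
    grupos).items

-- ===== PORT B =====
def pvKeyB (ing : List (String × String)) : String :=
  ((PySem.Dict.mk ing).get? "grupo").getD ""

def agrupar_ingredientes_py_alt (ingredientes : List (List (String × String))) : List (String × List (List (String × String))) :=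
  ["GRUPO2_VERDURAS", "GRUPO5_CARNES", "GRUPO1_CEREALES",
   "GRUPO3_FRUTAS", "GRUPO4_LACTEOS", "GRUPO7_GRASAS"].map
    (fun g => (g, ingredientes.filter (fun ing => pvKeyB ing == g)))

-- ===== PRECONDITION & SPEC =====
-- Pre_ excludes exactly the inputs where some ingredient dict lacks the 'grupo' key, on which
-- both A and B raise KeyError.
def Pre_agrupar_ingredientes_py (ingredientes : List (List (String × String))) : Prop :=
  (ingredientes.all (fun ing => (PySem.Dict.mk ing).contains "grupo")) = true
instance (ingredientes : List (List (String × String))) : Decidable (Pre_agrupar_ingredientes_py ingredientes) := by unfold Pre_agrupar_ingredientes_py; infer_instance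

def pvWitness_agrupar_ingredientes_py : (List (List (String × String))) :=
  [[("grupo", "GRUPO5_CARNES"), ("nombre", "pollo")], [("grupo", "otro")]]

def Spec_agrupar_ingredientes_py (ingredientes : List (List (String × String))) (out : List (String × List (List (String × String)))) : Prop := out = agrupar_ingredientes_py_alt ingredientes
instance (ingredientes : List (List (String × String))) (out : List (String × List (List (String × String)))) : Decidable (Spec_agrupar_ingredientes_py ingredientes out) := by unfold Spec_agrupar_ingredientes_py; infer_instance

-- ===== CLAIM (what is proved, stated in full; the proofs are below) =====
def Claim_equal_agrupar_ingredientes_py : Prop := ∀ (ingredientes : List (List (String × String))), Dom_agrupar_ingredientes_py ingredientes → Pre_agrupar_ingredientes_py ingredientes → Spec_agrupar_ingredientes_py ingredientes (agrupar_ingredientes_py ingredientes)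

-- ===== LEMMAS AND PROOFS =====

-- A's guarded-modify loop never changes the key list.
theorem pv_fold_keys (l : List (List (String × String)))
    (d : PySem.Dict String (List (List (String × String)))) :
    (l.foldl (fun gs ing =>
        if gs.contains (pvKeyA ing) then gs.modify (pvKeyA ing) [] (fun t => t ++ [ing]) else gs)
      d).keys = d.keys := by
  induction l generalizing d with
  | nil => rfl
  | cons ing rest ih =>
      simp only [List.foldl_cons]
      split
      · rw [ih, PySem.Dict.keys_modify,
           PySem.Dict.keys_insert_of_contains _ _ (by assumption)]
      · exact ih d

-- Value of A's loop at a key it starts with: the prefix value plus the matching ingredients.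
theorem pv_fold_getD (c : String) (l : List (List (String × String))) :
    ∀ (d : PySem.Dict String (List (List (String × String)))), d.contains c = true →
    (l.foldl (fun gs ing =>
        if gs.contains (pvKeyA ing) then gs.modify (pvKeyA ing) [] (fun t => t ++ [ing]) else gs)
      d).getD c [] = d.getD c [] ++ l.filter (fun ing => pvKeyA ing == c) := by
  induction l with
  | nil => intro d _; simp
  | cons ing rest ih =>
      intro d hc
      simp only [List.foldl_cons, List.filter_cons]
      by_cases hg : d.contains (pvKeyA ing) = true
      · rw [if_pos hg]
        have hc' : (d.modify (pvKeyA ing) [] (fun t => t ++ [ing])).contains c = true := by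
          simp [PySem.Dict.contains_modify, hc]
        rw [ih _ hc', PySem.Dict.getD_modify]
        by_cases hck : c = pvKeyA ing
        · subst hck; simp
        · rw [if_neg hck]
          have hne : (pvKeyA ing == c) = false := by
            rw [beq_eq_false_iff_ne]; exact fun h => hck h.symm
          rw [hne]; simp
      · rw [if_neg hg]
        have hne : (pvKeyA ing == c) = false := by
          rw [beq_eq_false_iff_ne]
          intro h; rw [h] at hg; exact hg hc
        rw [hne, ih d hc]; rfl

theorem agrupar_eq (ingredientes : List (List (String × String))) :
    agrupar_ingredientes_py ingredientes = agrupar_ingredientes_py_alt ingredientes := by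
  unfold agrupar_ingredientes_py agrupar_ingredientes_py_alt
  set d0 : PySem.Dict String (List (List (String × String))) :=
    PySem.Dict.ofList [("GRUPO2_VERDURAS", []), ("GRUPO5_CARNES", []), ("GRUPO1_CEREALES", []),
                       ("GRUPO3_FRUTAS", []), ("GRUPO4_LACTEOS", []), ("GRUPO7_GRASAS", [])] with hd0
  set F := (fun (gs : PySem.Dict String (List (List (String × String)))) ing =>
      let grupo := pvKeyA ing
      if gs.contains grupo then gs.modify grupo [] (fun l => l ++ [ing]) else gs) with hF
  have hkeys : (ingredientes.foldl F d0).keys = d0.keys := pv_fold_keys ingredientes d0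
  have hnd : (ingredientes.foldl F d0).keys.Nodup := by rw [hkeys, hd0]; decide
  rw [PySem.Dict.items_eq_map_keys _ hnd ([] : List (List (String × String)))]
  rw [hkeys]
  have hk0 : d0.keys = ["GRUPO2_VERDURAS", "GRUPO5_CARNES", "GRUPO1_CEREALES",
      "GRUPO3_FRUTAS", "GRUPO4_LACTEOS", "GRUPO7_GRASAS"] := by rw [hd0]; decide
  rw [hk0]
  simp only [List.map_cons, List.map_nil]
  have hget : ∀ c : String, d0.contains c = true → d0.getD c [] = [] →
      (ingredientes.foldl F d0).getD c [] = ingredientes.filter (fun ing => pvKeyA ing == c) := by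
    intro c hc h0
    rw [pv_fold_getD c ingredientes d0 hc, h0]; rfl
  rw [hget _ (by decide) (by decide), hget _ (by decide) (by decide),
      hget _ (by decide) (by decide), hget _ (by decide) (by decide),
      hget _ (by decide) (by decide), hget _ (by decide) (by decide)]
  rfl

-- ===== VERDICT (by name: the statement is the Claim_ definition above) =====
theorem agrupar_ingredientes_py_spec : Claim_equal_agrupar_ingredientes_py := by
  intro ingredientes _ _
  unfold Spec_agrupar_ingredientes_py
  exact agrupar_eq ingredientes
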